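-- pv_equiv track=rewrite | github.com/yoshihito-tsuji/RPpicow_BME680 | bme680_reader.py | _calc_gas_wait
-- ===== SOURCE A (Python) =====
-- def _calc_gas_wait(duration):
--     """ガス待機時間を計算"""
--     if duration >= 4096:
--         return 0xFF
--
--     factor = 0
--     while duration > 63:
--         duration = duration // 4
--         factor += 1
--
--     return int(duration + (factor * 64))
-- ===== SOURCE B (Python) =====
-- def _calc_gas_wait(duration):
--     """ガス待機時間を計算 (closed-form shift factor instead of the loop)"""
--     if duration >= 4096:
--         return 0xFF
--     if duration <= 63:
--         return int(duration)
--     # chained //4 until <=63 == one division by 4**factor,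
--     # factor = ceil((bit_length - 6) / 2) = (bit_length - 5) // 2  (bit_length >= 7 here)
--     factor = (duration.bit_length() - 5) // 2
--     return int(duration // 4 ** factor + 64 * factor)
-- ===== Notes on version B (the rewrite author's own statement) =====
-- stated objective: alternative
-- what changed: Replaces A's while-loop of repeated //4 divisions with a closed-form shift factor computed from the bit length (factor = (bit_length-5)//2) and a single division by 4**factor.
import Mathlib
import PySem

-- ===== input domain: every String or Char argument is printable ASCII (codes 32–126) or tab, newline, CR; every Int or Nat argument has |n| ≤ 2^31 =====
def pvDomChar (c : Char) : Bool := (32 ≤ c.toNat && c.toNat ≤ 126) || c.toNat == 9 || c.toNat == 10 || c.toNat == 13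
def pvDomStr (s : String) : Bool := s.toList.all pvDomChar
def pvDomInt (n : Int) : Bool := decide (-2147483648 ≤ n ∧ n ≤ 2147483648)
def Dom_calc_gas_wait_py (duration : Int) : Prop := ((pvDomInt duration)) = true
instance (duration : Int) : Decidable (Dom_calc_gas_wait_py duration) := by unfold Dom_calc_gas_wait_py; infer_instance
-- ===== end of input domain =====

-- B replaces A's repeated-//4 loop by a closed-form shift factor from the bit length (alternative algorithm, same result).

-- ===== PORT A =====
-- the while loop: state (duration, factor), one step per iteration
def gasWaitLoop (duration : Int) (factor : Int) : Int × Int :=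
  if duration > 63 then
    gasWaitLoop (PySem.Int.floordiv duration 4) (factor + 1)
  else
    (duration, factor)
termination_by duration.toNat
decreasing_by
  rw [PySem.Int.floordiv_eq_ediv_of_pos (by omega : (0:Int) < 4)]
  omega

def calc_gas_wait_py (duration : Int) : Int :=
  if duration ≥ 4096 then 0xFF
  else
    let p := gasWaitLoop duration 0
    p.1 + p.2 * 64

-- ===== PORT B =====
def calc_gas_wait_py_alt (duration : Int) : Int :=
  if duration ≥ 4096 then 0xFF
  else if duration ≤ 63 then duration
  else
    -- duration.bit_length() ported as PySem.Int.bitLength; bitLength ≥ 7 on this branch,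
    -- so Nat subtraction/division agree with Python's here
    let factor : Nat := (PySem.Int.bitLength duration - 5) / 2
    PySem.Int.floordiv duration (4 ^ factor) + 64 * (factor : Int)

-- ===== PRECONDITION & SPEC =====
def Spec_calc_gas_wait_py (duration : Int) (out : Int) : Prop := out = calc_gas_wait_py_alt duration
instance (duration : Int) (out : Int) : Decidable (Spec_calc_gas_wait_py duration out) := by unfold Spec_calc_gas_wait_py; infer_instance

-- ===== CLAIM (what is proved, stated in full; the proofs are below) =====
def Claim_equal_calc_gas_wait_py : Prop := ∀ (duration : Int), Dom_calc_gas_wait_py duration → Spec_calc_gas_wait_py duration (calc_gas_wait_py duration)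

-- ===== LEMMAS AND PROOFS =====

theorem gasWaitLoop_step (d f : Int) (h : d > 63) :
    gasWaitLoop d f = gasWaitLoop (d / 4) (f + 1) := by
  rw [gasWaitLoop, if_pos h, PySem.Int.floordiv_eq_ediv_of_pos (by omega : (0:Int) < 4)]

theorem gasWaitLoop_done (d f : Int) (h : ¬ d > 63) :
    gasWaitLoop d f = (d, f) := by
  rw [gasWaitLoop, if_neg h]

-- bit-length bracket: lo..hi range pins bitLength between bounds
theorem bitLength_bracket (d : Int) (a b : Nat) (h1 : (2:Int) ^ a ≤ d) (h2 : d < 2 ^ (b + 1)) :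
    a + 1 ≤ PySem.Int.bitLength d ∧ PySem.Int.bitLength d ≤ b + 1 := by
  have hdpos : 0 < d := lt_of_lt_of_le (by positivity) h1
  have hd0 : d ≠ 0 := by omega
  have hub := PySem.Int.lt_two_pow_bitLength d
  have hlb := PySem.Int.two_pow_bitLength_le d hd0
  have habs : d.natAbs = d.toNat := by omega
  constructor
  · by_contra hc
    have hble : PySem.Int.bitLength d ≤ a := by omega
    have : (2:Nat) ^ PySem.Int.bitLength d ≤ 2 ^ a := Nat.pow_le_pow_right (by norm_num) hble
    have h1' : (2:Nat) ^ a ≤ d.toNat := by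
      have := h1
      have : ((2:Nat) ^ a : Int) ≤ d := by push_cast; exact h1
      omega
    omega
  · by_contra hc
    have hble : b + 1 ≤ PySem.Int.bitLength d - 1 := by omega
    have : (2:Nat) ^ (b + 1) ≤ 2 ^ (PySem.Int.bitLength d - 1) := Nat.pow_le_pow_right (by norm_num) hble
    have h2' : d.toNat < (2:Nat) ^ (b + 1) := by
      have : d < ((2:Nat) ^ (b + 1) : Int) := by push_cast; exact h2
      omega
    omega

theorem floordiv_pow (d : Int) (k : Nat) (h : (0:Int) < 4 ^ k) :
    PySem.Int.floordiv d (4 ^ k) = d / 4 ^ k :=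
  PySem.Int.floordiv_eq_ediv_of_pos h

theorem mid_case (d : Int) (h64 : 64 ≤ d) (h4096 : d < 4096) :
    calc_gas_wait_py d = calc_gas_wait_py_alt d := by
  unfold calc_gas_wait_py calc_gas_wait_py_alt
  rw [if_neg (by omega), if_neg (by omega), if_neg (by omega)]
  rcases lt_or_ge d 256 with hA | hA
  · -- 64 ≤ d ≤ 255 : factor 1, bitLength ∈ {7,8}
    have hbl := bitLength_bracket d 6 7 (by norm_num; omega) (by norm_num; omega)
    have hf : (PySem.Int.bitLength d - 5) / 2 = 1 := by omega
    rw [gasWaitLoop_step d 0 (by omega), gasWaitLoop_done _ _ (by omega)]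
    simp only [hf, floordiv_pow d 1 (by norm_num)]
    norm_num
  · rcases lt_or_ge d 1024 with hB | hB
    · -- 256 ≤ d ≤ 1023 : factor 2, bitLength ∈ {9,10}
      have hbl := bitLength_bracket d 8 9 (by norm_num; omega) (by norm_num; omega)
      have hf : (PySem.Int.bitLength d - 5) / 2 = 2 := by omega
      rw [gasWaitLoop_step d 0 (by omega), gasWaitLoop_step _ _ (by omega),
          gasWaitLoop_done _ _ (by omega)]
      simp only [hf, floordiv_pow d 2 (by norm_num)]
      norm_num
      omega
    · -- 1024 ≤ d ≤ 4095 : factor 3, bitLength ∈ {11,12}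
      have hbl := bitLength_bracket d 10 11 (by norm_num; omega) (by norm_num; omega)
      have hf : (PySem.Int.bitLength d - 5) / 2 = 3 := by omega
      rw [gasWaitLoop_step d 0 (by omega), gasWaitLoop_step _ _ (by omega),
          gasWaitLoop_step _ _ (by omega), gasWaitLoop_done _ _ (by omega)]
      simp only [hf, floordiv_pow d 3 (by norm_num)]
      norm_num
      omega

-- ===== VERDICT (by name: the statement is the Claim_ definition above) =====
theorem calc_gas_wait_py_spec : Claim_equal_calc_gas_wait_py := by
  intro d _
  unfold Spec_calc_gas_wait_py
  rcases lt_or_ge d 4096 with h | h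
  · rcases lt_or_ge d 64 with h63 | h63
    · unfold calc_gas_wait_py calc_gas_wait_py_alt
      rw [if_neg (by omega), if_neg (by omega), if_pos (by omega : d ≤ 63),
          gasWaitLoop_done d 0 (by omega)]
      norm_num
    · exact mid_case d h63 h
  · unfold calc_gas_wait_py calc_gas_wait_py_alt
    rw [if_pos h, if_pos h]
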